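-- pv_equiv track=rewrite | github.com/syurskyi/Algorithms_and_Data_Structure | _algorithms_challenges/w3resource/Practice_python-master/python_strings.py | change_repeat
-- ===== SOURCE A (Python) =====
-- def change_repeat(word):
--     """ 4: replaces any re used letter in a string into a $. """
--     word = list(word)
--     used = []
--     index = 0
--     for letter in word:
--         if letter in used:
--             word[index] = '$'
--         else:
--             used.append(letter)
--         index += 1
--     return ''.join(word)
-- ===== SOURCE B (Python) =====
-- def change_repeat(word):
--     """ 4: replaces any re used letter in a string into a $. """
--     out = []
--     rest = word
--     while rest:
--         head = rest[0]
--         out.append(head)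
--         rest = rest[1:].replace(head, '$')
--     return ''.join(out)
-- ===== Notes on version B (the rewrite author's own statement) =====
-- stated objective: alternative
-- what changed: Replaces A's seen-list membership tracking with a head-peeling loop that blanks all later occurrences of each emitted character at once via str.replace on the remaining suffix, so no seen collection or membership test exists.
import Mathlib
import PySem

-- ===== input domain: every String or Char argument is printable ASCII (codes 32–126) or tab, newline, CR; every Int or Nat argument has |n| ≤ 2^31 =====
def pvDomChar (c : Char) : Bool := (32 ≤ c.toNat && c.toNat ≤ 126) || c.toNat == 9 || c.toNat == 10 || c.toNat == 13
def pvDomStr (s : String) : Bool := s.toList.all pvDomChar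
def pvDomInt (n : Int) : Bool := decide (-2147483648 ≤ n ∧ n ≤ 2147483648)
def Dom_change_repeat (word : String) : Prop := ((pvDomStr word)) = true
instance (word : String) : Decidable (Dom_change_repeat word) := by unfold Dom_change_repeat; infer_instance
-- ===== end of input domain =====

-- B drops the seen-list bookkeeping: it peels the head character off the remaining suffix
-- and blanks all of its later occurrences at once with str.replace (alternative decomposition).

-- ===== PORT A =====
-- A iterates `for letter in word` while writing '$' only at the CURRENT index, so the
-- letters read are the original characters: we recurse over the original letter list
-- carrying the mutated array `arr`, the `used` list and the running `index`.
def change_repeat_loop (arr used : List Char) (index : Nat) : List Char → List Char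
  | [] => arr
  | letter :: rest =>
    if letter ∈ used then
      change_repeat_loop (arr.set index '$') used (index + 1) rest
    else
      change_repeat_loop arr (used ++ [letter]) (index + 1) rest

def change_repeat (word : String) : String :=
  -- word = list(word); used = []; index = 0; the loop; ''.join(word)
  String.mk (change_repeat_loop word.toList [] 0 word.toList)

-- ===== PORT B =====
-- `rest[1:].replace(head, '$')` on a single character: exact as a map over the chars.
def change_repeat_alt_loop : List Char → List Char
  | [] => []
  | head :: tail =>
    -- out.append(head); rest = rest[1:].replace(head, '$')
    head :: change_repeat_alt_loop (tail.map (fun c => if c = head then '$' else c))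
termination_by rest => rest.length
decreasing_by simp

def change_repeat_alt (word : String) : String :=
  -- while rest: …; return ''.join(out)  (out accumulates the emitted heads)
  String.mk (change_repeat_alt_loop word.toList)

-- ===== PRECONDITION & SPEC =====
def Spec_change_repeat (word : String) (out : String) : Prop := out = change_repeat_alt word
instance (word : String) (out : String) : Decidable (Spec_change_repeat word out) := by unfold Spec_change_repeat; infer_instance

-- ===== CLAIM (what is proved, stated in full; the proofs are below) =====
def Claim_equal_change_repeat : Prop := ∀ (word : String), Dom_change_repeat word → Spec_change_repeat word (change_repeat word)

-- ===== LEMMAS AND PROOFS =====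

-- Reference: mark each char '$' iff it occurs in the (original) prefix before it.
def crSpec (opre : List Char) : List Char → List Char
  | [] => []
  | c :: rest => (if c ∈ opre then '$' else c) :: crSpec (opre ++ [c]) rest

theorem crSpec_congr (suf : List Char) : ∀ S1 S2 : List Char,
    (∀ x, x ∈ S1 ↔ x ∈ S2) → crSpec S1 suf = crSpec S2 suf := by
  induction suf with
  | nil => intro _ _ _; rfl
  | cons c rest ih =>
    intro S1 S2 h
    have h1 : (if c ∈ S1 then '$' else c) = (if c ∈ S2 then '$' else c) := by
      by_cases hc : c ∈ S1
      · rw [if_pos hc, if_pos ((h c).mp hc)]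
      · rw [if_neg hc, if_neg (fun hx => hc ((h c).mpr hx))]
    simp only [crSpec]
    rw [h1, ih (S1 ++ [c]) (S2 ++ [c]) (by intro x; simp [h x])]

theorem change_repeat_loop_eq (suf : List Char) :
    ∀ (acc used opre : List Char), acc.length = opre.length →
    (∀ x, x ∈ used ↔ x ∈ opre) →
    change_repeat_loop (acc ++ suf) used acc.length suf = acc ++ crSpec opre suf := by
  induction suf with
  | nil => intro acc used opre _ _; simp [change_repeat_loop, crSpec]
  | cons c rest ih =>
    intro acc used opre hlen hused
    by_cases hc : c ∈ opre
    · have hmem : c ∈ used := (hused c).mpr hc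
      have hset : (acc ++ c :: rest).set acc.length '$' = (acc ++ ['$']) ++ rest := by
        rw [List.set_append_right _ _ (le_refl acc.length)]
        simp
      have := ih (acc ++ ['$']) used (opre ++ [c])
        (by simp [hlen]) (by intro x; simp [hused x]; intro hx; subst hx; exact hc)
      simp only [change_repeat_loop, if_pos hmem, hset]
      have hlen' : acc.length + 1 = (acc ++ ['$']).length := by simp
      rw [hlen', this]
      simp [crSpec, if_pos hc]
    · have hmem : c ∉ used := fun h => hc ((hused c).mp h)
      have := ih (acc ++ [c]) (used ++ [c]) (opre ++ [c])
        (by simp [hlen])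
        (by intro x; simp [hused x])
      simp only [change_repeat_loop, if_neg hmem]
      have hassoc : acc ++ c :: rest = (acc ++ [c]) ++ rest := by simp
      have hlen' : acc.length + 1 = (acc ++ [c]).length := by simp
      rw [hassoc, hlen', this]
      simp [crSpec, if_neg hc]

-- B's invariant: the remaining suffix is the original suffix with every already-seen
-- character masked to '$'; masking is absorbed by the head-replacement step.
def crMask (S l : List Char) : List Char := l.map (fun c => if c ∈ S then '$' else c)

theorem alt_loop_mask (suf : List Char) : ∀ S : List Char,
    change_repeat_alt_loop (crMask S suf) = crSpec S suf := by
  induction suf with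
  | nil => intro S; simp [crMask, change_repeat_alt_loop, crSpec]
  | cons c rest ih =>
    intro S
    by_cases hc : c ∈ S
    · have this1 : crSpec (S ++ [c]) rest = crSpec S rest :=
        crSpec_congr rest _ _ (by intro x; simp; intro hx; subst hx; exact hc)
      have hmaps : List.map (fun x => if x = '$' then '$' else x)
          (List.map (fun c => if c ∈ S then '$' else c) rest) = crMask S rest := by
        rw [List.map_map]
        unfold crMask
        apply List.map_congr_left
        intro x _
        simp only [Function.comp]
        by_cases hx : x ∈ S
        · simp [hx]
        · simp only [if_neg hx]
          split_ifs with h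
          · exact h.symm
          · rfl
      simp only [crMask, List.map_cons, if_pos hc, change_repeat_alt_loop]
      rw [hmaps, ih S]
      simp only [crSpec, if_pos hc]
      rw [this1]
    · have hmaps : List.map (fun x => if x = c then '$' else x)
          (List.map (fun c => if c ∈ S then '$' else c) rest) = crMask (S ++ [c]) rest := by
        rw [List.map_map]
        unfold crMask
        apply List.map_congr_left
        intro x _
        simp only [Function.comp]
        by_cases hx : x ∈ S
        · rw [if_pos hx, if_pos (List.mem_append_left [c] hx)]
          split_ifs <;> rfl
        · rw [if_neg hx]
          by_cases hxc : x = c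
          · rw [if_pos hxc, if_pos (List.mem_append_right S (List.mem_singleton.mpr hxc))]
          · rw [if_neg hxc, if_neg (by
              intro h
              rcases List.mem_append.mp h with h' | h'
              · exact hx h'
              · exact hxc (List.mem_singleton.mp h'))]
      simp only [crMask, List.map_cons, if_neg hc, change_repeat_alt_loop]
      rw [hmaps, ih (S ++ [c])]
      simp [crSpec, if_neg hc]

theorem crMask_nil (l : List Char) : crMask [] l = l := by
  simp [crMask]

-- ===== VERDICT (by name: the statement is the Claim_ definition above) =====
theorem change_repeat_spec : Claim_equal_change_repeat := by
  intro word _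
  unfold Spec_change_repeat change_repeat change_repeat_alt
  have hA := change_repeat_loop_eq word.toList [] [] [] rfl (by intro x; simp)
  simp only [List.nil_append, List.length_nil] at hA
  have hB := alt_loop_mask word.toList []
  rw [crMask_nil] at hB
  rw [hA, hB]
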